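-- pv_equiv track=rewrite | github.com/mat-1/forum-sweats | forumsweats/discordbot.py | calculate_approximate_message_height
-- ===== SOURCE A (Python) =====
-- def calculate_approximate_message_height(message):
-- 	height = 0
-- 	current_line_length = 0
-- 	max_line_length = 180
--
-- 	for c in message:
-- 		# if it's a newline, we go back to the start of the line
-- 		if c == '\n':
-- 			current_line_length = 0
-- 			height += 1
-- 		# we always assume characters are 1 unit long, this is fine since we don't need exact measurements
-- 		else:
-- 			current_line_length += 1
--
-- 		if current_line_length > max_line_length:
-- 			current_line_length = 0
-- 			height += 1
-- 	return height
-- ===== SOURCE B (Python) =====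
-- def calculate_approximate_message_height(message):
-- 	segments = message.split('\n')
-- 	return (len(segments) - 1) + sum(len(segment) // 181 for segment in segments)
-- ===== Notes on version B (the rewrite author's own statement) =====
-- stated objective: simpler
-- what changed: Replaces the per-character accumulator loop (line-length counter with reset/wrap state) by splitting on newlines once and computing each segment's wrap count with integer division len(seg)//181.
import Mathlib
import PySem

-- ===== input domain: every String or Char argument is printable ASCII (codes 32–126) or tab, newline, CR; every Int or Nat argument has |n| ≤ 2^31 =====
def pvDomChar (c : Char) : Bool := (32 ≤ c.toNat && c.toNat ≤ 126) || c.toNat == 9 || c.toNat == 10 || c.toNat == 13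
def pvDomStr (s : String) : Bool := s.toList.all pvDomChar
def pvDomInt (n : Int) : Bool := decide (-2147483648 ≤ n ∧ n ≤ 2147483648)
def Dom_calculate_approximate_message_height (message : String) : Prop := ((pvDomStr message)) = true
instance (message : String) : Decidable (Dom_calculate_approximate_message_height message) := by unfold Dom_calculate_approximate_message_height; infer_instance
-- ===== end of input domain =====

-- B replaces A's per-character wrap counter by a per-line pass: split on '\n' and count wraps by integer division (objective: simpler).

-- ===== PORT A =====
-- one iteration of A's for-loop body: state = (height, current_line_length); max_line_length = 180
def pvStepA (st : Int × Int) (c : Char) : Int × Int :=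
  let st' := if c = '\n' then (st.1 + 1, (0 : Int)) else (st.1, st.2 + 1)
  if st'.2 > 180 then (st'.1 + 1, 0) else st'

def calculate_approximate_message_height (message : String) : Int :=
  (message.toList.foldl pvStepA ((0 : Int), (0 : Int))).1

-- ===== PORT B =====
-- message.split('\n') for the single-character separator is exactly List.splitOn '\n' on the code points
def calculate_approximate_message_height_alt (message : String) : Int :=
  let segments := message.toList.splitOn '\n'
  ((segments.length : Int) - 1)
    + (segments.map (fun seg => ((seg.length / 181 : Nat) : Int))).sum

-- ===== PRECONDITION & SPEC =====
def Spec_calculate_approximate_message_height (message : String) (out : Int) : Prop := out = calculate_approximate_message_height_alt message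
instance (message : String) (out : Int) : Decidable (Spec_calculate_approximate_message_height message out) := by unfold Spec_calculate_approximate_message_height; infer_instance

-- ===== CLAIM (what is proved, stated in full; the proofs are below) =====
def Claim_equal_calculate_approximate_message_height : Prop := ∀ (message : String), Dom_calculate_approximate_message_height message → Spec_calculate_approximate_message_height message (calculate_approximate_message_height message)

-- ===== LEMMAS AND PROOFS =====

-- The loop invariant: running A's loop from state (h, r) with 0 ≤ r ≤ 180 yields height
-- h + (number of segments - 1) + wraps of the first segment continued from length r + wraps of the rest.
theorem pv_fold_splitOn (l : List Char) : ∀ (h : Int) (r : Nat), r ≤ 180 →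
    (List.foldl pvStepA (h, (r : Nat)) l).1 =
      h + (((l.splitOn '\n').length : Int) - 1)
        + (((r + (l.splitOn '\n').headI.length) / 181 : Nat) : Int)
        + (((l.splitOn '\n').tail.map (fun s => ((s.length / 181 : Nat) : Int))).sum) := by
  induction l with
  | nil =>
      intro h r hr
      simp [List.splitOn, List.splitOnP_nil]
      omega
  | cons c rest ih =>
      intro h r hr
      obtain ⟨s0, tl, hst⟩ := List.exists_cons_of_ne_nil
        (List.splitOnP_ne_nil (fun x => x == '\n') rest)
      simp only [List.splitOn] at *
      by_cases hc : c = '\n'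
      · -- newline: height+1, counter reset to 0
        have hstep : pvStepA (h, (r : Nat)) c = (h + 1, ((0 : Nat) : Int)) := by
          simp [pvStepA, hc]
        have ih0 := ih (h + 1) 0 (by omega)
        rw [List.foldl_cons, hstep, ih0, List.splitOnP_cons]
        simp only [hc, beq_self_eq_true, if_true, hst, List.length_cons, List.headI_cons,
          List.tail_cons, List.map_cons, List.sum_cons, List.length_nil]
        have e1 : (0 + s0.length) / 181 = s0.length / 181 := by omega
        have e2 : (r + 0) / 181 = 0 := by omega
        rw [e1, e2]
        push_cast
        ring
      · have hbc : (c == '\n') = false := by simp [hc]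
        by_cases hr180 : r = 180
        · -- wrap fires: counter resets, height+1
          have hstep : pvStepA (h, (r : Nat)) c = (h + 1, ((0 : Nat) : Int)) := by
            subst hr180; norm_num [pvStepA, hc]
          have ih0 := ih (h + 1) 0 (by omega)
          rw [List.foldl_cons, hstep, ih0, List.splitOnP_cons, hbc]
          simp only [Bool.false_eq_true, if_false, hst, List.modifyHead_cons,
            List.length_cons, List.headI_cons, List.tail_cons]
          have e1 : (0 + s0.length) / 181 = s0.length / 181 := by omega
          have e2 : (r + (s0.length + 1)) / 181 = s0.length / 181 + 1 := by omega
          rw [e1, e2]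
          push_cast
          ring
        · -- ordinary character: counter increments
          have hlt : ¬ ((r : Int) + 1 > 180) := by omega
          have hstep : pvStepA (h, (r : Nat)) c = (h, ((r + 1 : Nat) : Int)) := by
            simp [pvStepA, hc, hlt]
          have ih1 := ih h (r + 1) (by omega)
          rw [List.foldl_cons, hstep, ih1, List.splitOnP_cons, hbc]
          simp only [Bool.false_eq_true, if_false, hst, List.modifyHead_cons,
            List.length_cons, List.headI_cons, List.tail_cons]
          have e1 : (r + 1 + s0.length) / 181 = (r + (s0.length + 1)) / 181 := by omega
          rw [e1]

-- ===== VERDICT (by name: the statement is the Claim_ definition above) =====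
theorem calculate_approximate_message_height_spec : Claim_equal_calculate_approximate_message_height := by
  intro message _
  unfold Spec_calculate_approximate_message_height
  unfold calculate_approximate_message_height calculate_approximate_message_height_alt
  have h := pv_fold_splitOn message.toList 0 0 (by omega)
  simp only [Nat.cast_zero] at h
  rw [h]
  obtain ⟨s0, tl, hst⟩ := List.exists_cons_of_ne_nil
    (List.splitOnP_ne_nil (fun x => x == '\n') message.toList)
  simp only [List.splitOn] at *
  rw [hst]
  simp only [List.length_cons, List.headI_cons, List.tail_cons, List.map_cons, List.sum_cons]
  have e1 : (0 + s0.length) / 181 = s0.length / 181 := by omega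
  rw [e1]
  push_cast
  ring
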